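-- pv_equiv track=rewrite | github.com/KChen89/Google-foobar | Level_2/solution_Q2.py | most_stingy
-- ===== SOURCE A (Python) =====
-- def most_stingy(n):
-- 	'''
-- 	first and second lowest level get paid one lambs
-- 	other level henchmen gets paid the sum of
-- 	their subordinates and subordinate's subordinate's pay
-- 	1,1,2,3,5,8,13, ...
-- 	'''
-- 	prev_prev=1
-- 	prev=1
-- 	temp_sum=0
-- 	num_henchmen=0
-- 	while True:
-- 		num_henchmen+=1
-- 		if num_henchmen==1:
-- 			temp_sum+=prev_prev
--
-- 		elif num_henchmen==2:
-- 			temp_sum+=prev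
--
-- 		else: # num_henchmen>2
-- 			current=prev_prev+prev
-- 			temp_sum+=current
-- 			prev_prev=prev
-- 			prev=current
-- 		if temp_sum>n:
-- 			break
-- 	return num_henchmen-1
-- ===== SOURCE B (Python) =====
-- def most_stingy(n):
--     # sum of the first k Fibonacci terms (1,1,2,...) is fib(k+2)-1,
--     # so the prefix sum stays <= n exactly while fib(k+2) <= n+1
--     a, b, k = 1, 1, 0
--     while a + b <= n + 1:
--         a, b = b, a + b
--         k += 1
--     return k
-- ===== Notes on version B (the rewrite author's own statement) =====
-- stated objective: simpler
-- what changed: B drops A's explicit prefix-sum accumulator and the num_henchmen==1/==2 special-case branches, using the identity sum_fib(k)=fib(k+2)-1 to keep only a Fibonacci pair and a counter.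
import Mathlib
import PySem

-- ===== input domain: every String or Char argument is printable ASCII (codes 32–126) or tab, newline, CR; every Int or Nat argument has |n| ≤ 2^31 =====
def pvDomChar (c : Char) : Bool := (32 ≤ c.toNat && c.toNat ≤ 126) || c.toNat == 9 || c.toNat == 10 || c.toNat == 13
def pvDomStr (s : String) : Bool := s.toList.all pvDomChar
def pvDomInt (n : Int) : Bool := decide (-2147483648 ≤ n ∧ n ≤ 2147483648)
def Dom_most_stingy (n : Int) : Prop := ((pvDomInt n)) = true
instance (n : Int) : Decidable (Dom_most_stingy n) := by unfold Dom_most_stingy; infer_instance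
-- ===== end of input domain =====

-- B replaces A's prefix-sum accumulator and counter special cases with a bare
-- Fibonacci pair, using sum_fib(k) = fib(k+2) - 1 (objective: simpler; same cost).

-- ===== PORT A =====
-- A's `while True` loop, fueled for totality; each iteration increments
-- num_henchmen, adds the branch-selected term to temp_sum, and breaks
-- (returning num_henchmen - 1) once temp_sum > n.  The fuel n.toNat + 3 is
-- never exhausted on the actual run (temp_sum ≥ number of iterations).
def most_stingy_loop (n : Int) : Nat → Int → Int → Int → Int → Int
  | 0, _, _, _, num => num - 1
  | fuel + 1, prev_prev, prev, temp_sum, num_henchmen =>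
    let num_henchmen := num_henchmen + 1
    let st :=
      if num_henchmen = 1 then (prev_prev, prev, temp_sum + prev_prev)
      else if num_henchmen = 2 then (prev_prev, prev, temp_sum + prev)
      else
        let current := prev_prev + prev
        (prev, current, temp_sum + current)
    if st.2.2 > n then num_henchmen - 1
    else most_stingy_loop n fuel st.1 st.2.1 st.2.2 num_henchmen

def most_stingy (n : Int) : Int := most_stingy_loop n (n.toNat + 3) 1 1 0 0

-- ===== PORT B =====
-- B's `while a + b <= n + 1` loop, fueled for totality (the loop runs at most
-- n.toNat times since the counter stays below the accumulated Fibonacci sum).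
def most_stingy_alt_loop (n : Int) : Nat → Int → Int → Int → Int
  | 0, _, _, k => k
  | fuel + 1, a, b, k =>
    if a + b ≤ n + 1 then most_stingy_alt_loop n fuel b (a + b) (k + 1) else k

def most_stingy_alt (n : Int) : Int := most_stingy_alt_loop n (n.toNat + 2) 1 1 0

-- ===== PRECONDITION & SPEC =====
def Spec_most_stingy (n : Int) (out : Int) : Prop := out = most_stingy_alt n
instance (n : Int) (out : Int) : Decidable (Spec_most_stingy n out) := by unfold Spec_most_stingy; infer_instance

-- ===== CLAIM (what is proved, stated in full; the proofs are below) =====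
def Claim_equal_most_stingy : Prop := ∀ (n : Int), Dom_most_stingy n → Spec_most_stingy n (most_stingy n)

-- ===== LEMMAS AND PROOFS =====

-- Bisimulation of the two loops from the third iteration onward.  A's state
-- (prev_prev, prev, temp_sum) with temp_sum = prev_prev + 2*prev - 1 matches
-- B's state (a, b) = (prev_prev + prev, prev_prev + 2*prev); A consumes one
-- extra unit of fuel for its final (breaking) iteration.
theorem loop_bisim (n : Int) : ∀ (f : Nat) (pp p k : Int), 2 ≤ k →
    most_stingy_loop n (f + 1) pp p (pp + 2 * p - 1) k
      = most_stingy_alt_loop n f (pp + p) (pp + 2 * p) k := by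
  intro f
  induction f with
  | zero =>
    intro pp p k hk
    simp only [most_stingy_loop, most_stingy_alt_loop]
    have h1 : ¬ (k + 1 = 1) := by omega
    have h2 : ¬ (k + 1 = 2) := by omega
    simp only [h1, h2, if_false]
    split_ifs with h
    · omega
    · simp
  | succ f ih =>
    intro pp p k hk
    conv_lhs => rw [most_stingy_loop]
    conv_rhs => rw [most_stingy_alt_loop]
    have h1 : ¬ (k + 1 = 1) := by omega
    have h2 : ¬ (k + 1 = 2) := by omega
    simp only [h1, h2, if_false]
    by_cases h : pp + 2 * p - 1 + (pp + p) > n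
    · have h' : ¬ (pp + p + (pp + 2 * p) ≤ n + 1) := by omega
      simp only [h, h', if_true, if_false]
      · omega
    · have h' : pp + p + (pp + 2 * p) ≤ n + 1 := by omega
      simp only [h, h', if_true, if_false]
      have := ih p (pp + p) (k + 1) (by omega)
      have e1 : p + 2 * (pp + p) - 1 = pp + 2 * p - 1 + (pp + p) := by ring
      have e2 : p + (pp + p) = pp + 2 * p := by ring
      have e3 : p + 2 * (pp + p) = pp + p + (pp + 2 * p) := by ring
      rw [e1, e2, e3] at this
      simpa using this

-- ===== VERDICT (by name: the statement is the Claim_ definition above) =====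
theorem most_stingy_spec : Claim_equal_most_stingy := by
  intro n _
  unfold Spec_most_stingy most_stingy most_stingy_alt
  -- unroll A's first two iterations and B's first two condition checks
  rw [show n.toNat + 3 = (n.toNat + 1) + 1 + 1 from by omega,
      show n.toNat + 2 = n.toNat + 1 + 1 from by omega]
  rw [most_stingy_loop, most_stingy_alt_loop]
  norm_num
  rw [most_stingy_loop, most_stingy_alt_loop]
  norm_num
  split_ifs with h1 h2 h3 h4 h5 h6 h7
  all_goals try omega
  -- remaining case n ≥ 2: both sides reach the aligned state (pp,p)=(1,1), (a,b)=(2,3), k=2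
  have := loop_bisim n n.toNat 1 1 2 (by omega)
  norm_num at this
  convert this using 2 <;> omega
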